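-- pv_equiv track=rewrite | github.com/logankraver/Project-Insight | webscraping.py | deleteremovedcomments
-- ===== SOURCE A (Python) =====
-- def deleteremovedcomments(comments):
--     """
--     Function to remove all '[removed]' comments from a list of reddit comments
--
--     Parameter comments is a list of strings of reddit comments
--
--     Returns a new list without the '[removed]' comments
--     """
--     itemstoremove = []
--     for x in range(len(comments)):
--         if comments[x] == '[removed]':
--             itemstoremove.append(x)
--     itemstoremove.reverse()
--     for y in itemstoremove:
--         comments.pop(y)
--     return comments
-- ===== SOURCE B (Python) =====
-- def deleteremovedcomments(comments):
--     """
--     Remove all '[removed]' comments from a list of reddit comments,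
--     in place, returning the same list object.
--
--     Single forward pass with a write cursor: keep elements are written
--     back at index w (always <= the read index, so reads are unaffected),
--     then the stale tail is truncated.
--     """
--     w = 0
--     for c in comments:
--         if c != '[removed]':
--             comments[w] = c
--             w += 1
--     del comments[w:]
--     return comments
-- ===== Notes on version B (the rewrite author's own statement) =====
-- stated objective: alternative
-- what changed: Replaces A's collect-matching-indices / reverse / repeated list.pop removal with a single forward two-pointer compaction (overwrite at a write cursor, then truncate the tail), still mutating and returning the same list object.
import Mathlib
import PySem

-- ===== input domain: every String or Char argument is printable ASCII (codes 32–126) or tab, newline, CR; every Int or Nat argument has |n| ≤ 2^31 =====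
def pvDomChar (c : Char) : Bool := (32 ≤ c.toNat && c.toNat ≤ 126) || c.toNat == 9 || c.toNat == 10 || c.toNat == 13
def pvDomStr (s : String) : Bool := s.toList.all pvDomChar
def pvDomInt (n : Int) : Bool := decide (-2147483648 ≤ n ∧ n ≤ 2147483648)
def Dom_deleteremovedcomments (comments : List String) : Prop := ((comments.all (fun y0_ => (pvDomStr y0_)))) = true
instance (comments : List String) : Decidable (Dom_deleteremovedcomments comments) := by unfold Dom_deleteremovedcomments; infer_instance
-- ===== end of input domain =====

-- B replaces A's collect-indices/reverse/repeated-pop removal by a single forward two-pointer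
-- compaction (objective: alternative). Both Pythons mutate `comments` in place and return it, with
-- the same final in-place contents; the theorems here are about the returned value.

-- ===== PORT A =====
def deleteremovedcomments (comments : List String) : List String :=
  -- itemstoremove = []; for x in range(len(comments)): if comments[x] == '[removed]': append x
  let itemstoremove : List Int :=
    (PySem.List.pyRange 0 (comments.length : Int) 1).foldl
      (fun acc x =>
        match PySem.List.pyGet? comments x with
        | some c => if c = "[removed]" then acc ++ [x] else acc
        | none => acc)  -- totality guard only: x ranges over in-range indices
      []
  -- itemstoremove.reverse(); for y in itemstoremove: comments.pop(y)
  itemstoremove.reverse.foldl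
    (fun cur y =>
      match PySem.List.pop? cur y with
      | some r => r.2
      | none => cur)  -- totality guard only: the popped indices are always valid
    comments

-- ===== PORT B =====
-- Two-pointer compaction. The Python reads `comments[i]` from the list it is mutating, but every
-- write lands at index w ≤ i, below the read position, so each read sees the ORIGINAL element:
-- folding over the original list is exact. `del comments[w:]` is the final `take w`.
def deleteremovedcomments_alt (comments : List String) : List String :=
  let st :=
    comments.foldl
      (fun (st : List String × Nat) c =>
        if c ≠ "[removed]" then (st.1.set st.2 c, st.2 + 1) else st)
      (comments, 0)
  st.1.take st.2

-- ===== PRECONDITION & SPEC =====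
def Spec_deleteremovedcomments (comments : List String) (out : List String) : Prop := out = deleteremovedcomments_alt comments
instance (comments : List String) (out : List String) : Decidable (Spec_deleteremovedcomments comments out) := by unfold Spec_deleteremovedcomments; infer_instance

-- ===== CLAIM (what is proved, stated in full; the proofs are below) =====
def Claim_equal_deleteremovedcomments : Prop := ∀ (comments : List String), Dom_deleteremovedcomments comments → Spec_deleteremovedcomments comments (deleteremovedcomments comments)

-- ===== LEMMAS AND PROOFS =====

/-- The indices (as naturals) at which `l` holds `"[removed]"`, cons-structured. -/
def midx : List String → List Nat
  | [] => []
  | c :: l => (if c = "[removed]" then [0] else []) ++ (midx l).map (· + 1)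

/-- A's popping loop, as a standalone function. -/
def popAllI (js : List Int) (l : List String) : List String :=
  js.foldl
    (fun cur y =>
      match PySem.List.pop? cur y with
      | some r => r.2
      | none => cur)
    l

lemma popAllI_nil (l : List String) : popAllI [] l = l := rfl

lemma popAllI_cons (y : Int) (js : List Int) (l : List String) :
    popAllI (y :: js) l
      = popAllI js (match PySem.List.pop? l y with | some r => r.2 | none => l) := rfl

lemma popAllI_append (xs ys : List Int) (l : List String) :
    popAllI (xs ++ ys) l = popAllI ys (popAllI xs l) := by
  simp [popAllI, List.foldl_append]

lemma midx_lt {l : List String} {j : Nat} (h : j ∈ midx l) : j < l.length := by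
  induction l generalizing j with
  | nil => simp [midx] at h
  | cons c l ih =>
    simp only [midx, List.mem_append, List.mem_map] at h
    rcases h with h | ⟨k, hk, rfl⟩
    · split at h <;> simp_all
    · have := ih hk; simp; omega

lemma midx_pairwise (l : List String) : (midx l).Pairwise (· < ·) := by
  induction l with
  | nil => simp [midx]
  | cons c l ih =>
    simp only [midx]
    refine List.pairwise_append.2 ⟨?_, ?_, ?_⟩
    · split <;> simp
    · exact List.pairwise_map.2 (ih.imp (by omega))
    · intro a ha b hb
      simp only [List.mem_map] at hb
      obtain ⟨k, _, rfl⟩ := hb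
      split at ha <;> simp_all

lemma idx_nat (l : List String) :
    (List.range l.length).filter (fun k => decide (l[k]? = some "[removed]")) = midx l := by
  induction l with
  | nil => simp [midx]
  | cons c l ih =>
    rw [List.length_cons, List.range_succ_eq_map, List.filter_cons]
    simp only [List.filter_map]
    have hcomp :
        ((fun k => decide ((c :: l)[k]? = some "[removed]")) ∘ (· + 1))
          = fun k => decide (l[k]? = some "[removed]") := by
      funext k; simp
    rw [hcomp, ih, midx]
    by_cases hc : c = "[removed]" <;> simp [hc]

/-- A's first loop computes exactly the matching indices, as Int casts of `midx`. -/
lemma itemstoremove_eq (l : List String) :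
    (PySem.List.pyRange 0 (l.length : Int) 1).foldl
      (fun acc x =>
        match PySem.List.pyGet? l x with
        | some c => if c = "[removed]" then acc ++ [x] else acc
        | none => acc)
      []
    = (midx l).map Int.ofNat := by
  have hstep :
      (PySem.List.pyRange 0 (l.length : Int) 1).foldl
        (fun acc x =>
          match PySem.List.pyGet? l x with
          | some c => if c = "[removed]" then acc ++ [x] else acc
          | none => acc)
        []
      = (PySem.List.pyRange 0 (l.length : Int) 1).foldl
          (fun acc x => if decide (PySem.List.pyGet? l x = some "[removed]") then acc ++ [x] else acc)
          [] := by
    apply PySem.List.foldl_congr_mem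
    intro acc x _
    rcases PySem.List.pyGet? l x with _ | c
    · simp
    · by_cases hc : c = "[removed]" <;> simp [hc]
  rw [hstep, PySem.List.foldl_append_if_eq_filter, List.nil_append,
      PySem.List.pyRange_zero_nat, List.filter_map]
  have hcomp :
      ((fun x => decide (PySem.List.pyGet? l x = some "[removed]")) ∘ (fun k : Nat => (k : Int)))
        = fun k : Nat => decide (l[k]? = some "[removed]") := by
    funext k; simp [PySem.List.pyGet?_natCast]
  rw [hcomp, idx_nat]
  simp [Int.ofNat_eq_natCast]

/-- Popping a strictly descending list of valid indices, all shifted by one, on `a :: l`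
    keeps the head and pops the unshifted indices from `l`. -/
lemma popAll_shift (js : List Nat) :
    ∀ (l : List String) (a : String), js.Pairwise (· > ·) → (∀ j ∈ js, j < l.length) →
      popAllI (js.map (fun j => Int.ofNat (j + 1))) (a :: l)
        = a :: popAllI (js.map Int.ofNat) l := by
  induction js with
  | nil => intro l a _ _; simp [popAllI]
  | cons j js ih =>
    intro l a hpw hlt
    have hj : j < l.length := hlt j (by simp)
    have h1 := PySem.List.pop?_natCast (a :: l) (j + 1) (by simp; omega)
    have h2 := PySem.List.pop?_natCast l j hj
    rw [List.map_cons, List.map_cons, popAllI_cons, popAllI_cons]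
    rw [show ((Int.ofNat (j + 1)) : Int) = ((j + 1 : Nat) : Int) from rfl,
        show ((Int.ofNat j) : Int) = ((j : Nat) : Int) from rfl, h1, h2]
    simp only [List.eraseIdx_cons_succ]
    exact ih (l.eraseIdx j) a hpw.of_cons
      (fun k hk => by
        have hkj : k < j := List.rel_of_pairwise_cons hpw hk
        rw [List.length_eraseIdx_of_lt hj]; omega)

/-- Popping the reversed matching indices removes exactly the `"[removed]"` elements. -/
lemma popAll_midx (l : List String) :
    popAllI (((midx l).map Int.ofNat).reverse) l
      = l.filter (fun c => decide (c ≠ "[removed]")) := by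
  induction l with
  | nil => simp [midx, popAllI]
  | cons c l ih =>
    have hshift :
        popAllI (((midx l).reverse).map (fun j => Int.ofNat (j + 1))) (c :: l)
          = c :: popAllI (((midx l).reverse).map Int.ofNat) l := by
      refine popAll_shift _ l c ?_ ?_
      · exact (List.pairwise_reverse).2 (midx_pairwise l)
      · intro j hj; exact midx_lt (List.mem_reverse.1 hj)
    have hmaps :
        ((midx (c :: l)).map Int.ofNat).reverse
          = ((midx l).reverse).map (fun j => Int.ofNat (j + 1))
            ++ (if c = "[removed]" then [(0 : Int)] else []) := by
      by_cases hc : c = "[removed]" <;>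
        simp [midx, hc, List.map_reverse, List.map_map, Function.comp]
    have hrev : ((midx l).reverse).map Int.ofNat
        = ((midx l).map Int.ofNat).reverse := by simp [List.map_reverse]
    rw [hmaps, popAllI_append, hshift, hrev, ih]
    by_cases hc : c = "[removed]"
    · simp [popAllI_cons, popAllI_nil, PySem.List.pop?_zero_cons, hc]
    · simp [hc, popAllI_nil]

/-- Invariant of B's compaction loop: the kept prefix is the filtered processed part. -/
lemma compact_inv :
    ∀ (rest arr : List String) (w : Nat), w + rest.length ≤ arr.length →
      (let r := rest.foldl
          (fun (st : List String × Nat) c =>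
            if c ≠ "[removed]" then (st.1.set st.2 c, st.2 + 1) else st)
          (arr, w)
       r.1.take r.2)
      = arr.take w ++ rest.filter (fun c => decide (c ≠ "[removed]")) := by
  intro rest
  induction rest with
  | nil => intro arr w _; simp
  | cons c rest ih =>
    intro arr w hlen
    have hw : w < arr.length := by simp at hlen; omega
    by_cases hc : c = "[removed]"
    · simpa [hc] using ih arr w (by simp at hlen ⊢; omega)
    · have hlen' : (w + 1) + rest.length ≤ (arr.set w c).length := by
        simp at hlen ⊢; omega
      have hmain := ih (arr.set w c) (w + 1) hlen'
      simp only [List.foldl_cons, if_pos (by simpa using hc)] at *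
      rw [hmain]
      have htake : (arr.set w c).take (w + 1) = arr.take w ++ [c] := by
        rw [List.set_eq_take_cons_drop c hw, List.take_append]
        simp [List.length_take, Nat.min_eq_left (Nat.le_of_lt hw)]
      rw [htake, List.filter_cons, if_pos (by simpa using hc)]
      simp

lemma altFilter (l : List String) :
    deleteremovedcomments_alt l = l.filter (fun c => decide (c ≠ "[removed]")) := by
  have := compact_inv l l 0 (by omega)
  simpa [deleteremovedcomments_alt] using this

-- ===== VERDICT (by name: the statement is the Claim_ definition above) =====
theorem deleteremovedcomments_spec : Claim_equal_deleteremovedcomments := by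
  intro comments _
  show deleteremovedcomments comments = deleteremovedcomments_alt comments
  rw [altFilter]
  show popAllI
      (((PySem.List.pyRange 0 (comments.length : Int) 1).foldl
          (fun acc x =>
            match PySem.List.pyGet? comments x with
            | some c => if c = "[removed]" then acc ++ [x] else acc
            | none => acc)
          []).reverse) comments
    = comments.filter (fun c => decide (c ≠ "[removed]"))
  rw [itemstoremove_eq, popAll_midx]
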